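-- pv_equiv track=rewrite | github.com/nsaitqulov/list_search | find08_min_count.py | find_min_count
-- ===== SOURCE A (Python) =====
-- def find_min_count(data):
--     """
--     Given the list of numbers, Find count of minimum numbers in the list
--     args:
--         data: list of numbers
--     returns: count of minimum numbers in the list
--     """
--     i = 0
--     a = data[0]
--     while i < len(data):
--         if a > data[i]:
--             a = data[i]
--         i += 1
--     return data.count(a)
-- ===== SOURCE B (Python) =====
-- def find_min_count(data):
--     """
--     Given the list of numbers, Find count of minimum numbers in the list
--     args:
--         data: list of numbers
--     returns: count of minimum numbers in the list
--     """
--     m = data[0]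
--     count = 1
--     for x in data[1:]:
--         if x < m:
--             m = x
--             count = 1
--         elif x == m:
--             count += 1
--     return count
-- ===== Notes on version B (the rewrite author's own statement) =====
-- stated objective: faster
-- what changed: Replaces the find-min index loop plus a separate data.count pass with one fused traversal that maintains the current minimum and its running tally (reset to 1 on a strictly smaller element, increment on equality).
import Mathlib
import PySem

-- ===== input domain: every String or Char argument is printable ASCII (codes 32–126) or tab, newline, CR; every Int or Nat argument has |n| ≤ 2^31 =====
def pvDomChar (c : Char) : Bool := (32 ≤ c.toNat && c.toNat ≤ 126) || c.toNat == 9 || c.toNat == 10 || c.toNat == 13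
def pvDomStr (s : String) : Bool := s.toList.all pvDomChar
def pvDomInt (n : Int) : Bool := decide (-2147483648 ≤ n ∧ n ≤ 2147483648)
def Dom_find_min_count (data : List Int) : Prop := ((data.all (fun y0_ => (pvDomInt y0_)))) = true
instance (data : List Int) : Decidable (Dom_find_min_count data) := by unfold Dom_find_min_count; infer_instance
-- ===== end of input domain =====

-- B fuses A's find-min loop and separate data.count pass into one traversal keeping (min, tally).


-- ===== PORT A =====
-- a = data[0]; while i < len(data): if a > data[i]: a = data[i]; return data.count(a)
def find_min_count (data : List Int) : Int :=
  match PySem.List.pyGet? data 0 with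
  | none => 0   -- IndexError on empty input; excluded by Pre_
  | some a0 =>
    let a := data.foldl (fun a x => if a > x then x else a) a0
    (PySem.List.count data a : Int)

-- ===== PORT B =====
-- fused single pass: m = data[0]; count = 1; for x in data[1:]: reset/increment
def fmcLoop : List Int → Int → Int → Int × Int
  | [], m, c => (m, c)
  | x :: t, m, c =>
    if x < m then fmcLoop t x 1
    else if x = m then fmcLoop t m (c + 1)
    else fmcLoop t m c

def find_min_count_alt (data : List Int) : Int :=
  match data with
  | [] => 0   -- IndexError on empty input; excluded by Pre_
  | d :: t => (fmcLoop t d 1).2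

-- ===== PRECONDITION & SPEC =====
-- Pre_ excludes only the empty list, on which Python A raises IndexError (data[0]).
def Pre_find_min_count (data : List Int) : Prop := data ≠ []
instance (data : List Int) : Decidable (Pre_find_min_count data) := by unfold Pre_find_min_count; infer_instance
def pvWitness_find_min_count : List Int := ([3, 1, 2, 1])

def Spec_find_min_count (data : List Int) (out : Int) : Prop := out = find_min_count_alt data
instance (data : List Int) (out : Int) : Decidable (Spec_find_min_count data out) := by unfold Spec_find_min_count; infer_instance

-- ===== CLAIM (what is proved, stated in full; the proofs are below) =====
def Claim_equal_find_min_count : Prop := ∀ (data : List Int), Dom_find_min_count data → Pre_find_min_count data → Spec_find_min_count data (find_min_count data)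

-- ===== LEMMAS AND PROOFS =====
lemma fmc_foldl_le (t : List Int) (m : Int) :
    t.foldl (fun a x => if x < a then x else a) m ≤ m := by
  induction t generalizing m with
  | nil => simp
  | cons x t ih =>
    simp only [List.foldl_cons]
    split
    · exact le_trans (ih x) (by omega)
    · exact ih m

lemma fmcLoop_spec (t : List Int) (m c : Int) :
    fmcLoop t m c =
      (t.foldl (fun a x => if x < a then x else a) m,
       if t.foldl (fun a x => if x < a then x else a) m = m
       then c + (t.count (t.foldl (fun a x => if x < a then x else a) m) : Int)
       else (t.count (t.foldl (fun a x => if x < a then x else a) m) : Int)) := by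
  induction t generalizing m c with
  | nil => simp [fmcLoop]
  | cons x t ih =>
    simp only [fmcLoop, List.foldl_cons]
    by_cases hx : x < m
    · rw [if_pos hx, if_pos hx, ih x 1]
      have hle := fmc_foldl_le t x
      simp only [Prod.mk.injEq, List.count_cons, beq_iff_eq]
      refine ⟨by trivial, ?_⟩
      push_cast
      split_ifs <;> omega
    · rw [if_neg hx, if_neg hx]
      have hle := fmc_foldl_le t m
      by_cases hxm : x = m
      · rw [if_pos hxm, ih m (c + 1)]
        subst hxm
        simp only [Prod.mk.injEq, List.count_cons, beq_iff_eq]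
        refine ⟨by trivial, ?_⟩
        push_cast
        split_ifs <;> omega
      · rw [if_neg hxm, ih m c]
        simp only [Prod.mk.injEq, List.count_cons, beq_iff_eq]
        refine ⟨by trivial, ?_⟩
        push_cast
        split_ifs <;> omega

-- ===== VERDICT (by name: the statement is the Claim_ definition above) =====
theorem find_min_count_spec : Claim_equal_find_min_count := by
  intro data _ hpre
  unfold Spec_find_min_count
  match data with
  | [] => exact absurd rfl hpre
  | d :: t =>
    unfold find_min_count find_min_count_alt
    simp only [PySem.List.pyGet?, PySem.List.pyIdx?]
    norm_num
    rw [fmcLoop_spec t d 1]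
    have hle := fmc_foldl_le t d
    simp only [List.count_cons, beq_iff_eq]
    push_cast
    split_ifs <;> omega
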